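-- pv_equiv track=rewrite | github.com/Toluar/Advent_of_Code | 2015/Day10/Day10-1.py | TPascal
-- ===== SOURCE A (Python) =====
-- def TPascal(s):
--     new_s = ''
--     c = 0
--     curr = s[0]
--     for i in range(len(s)):
--         if (i > 0 and s[i] != curr):
--             new_s += f'{c}{s[i-1]}'
--             curr = s[i]
--             c = 0
--         c += 1
--     new_s += f'{c}{curr}'
--     return new_s
-- ===== SOURCE B (Python) =====
-- def TPascal(s):
--     # run-length scan: for each maximal run of equal chars, emit "<length><char>"
--     out = []
--     i = 0
--     n = len(s)
--     while i < n:
--         j = i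
--         while j < n and s[j] == s[i]:
--             j += 1
--         out.append(f'{j - i}{s[i]}')
--         i = j
--     return ''.join(out)
-- ===== Notes on version B (the rewrite author's own statement) =====
-- stated objective: idiomatic
-- what changed: Replaces the index loop with counter/curr/prev-char state and repeated string += by a nested run-scan (advance j over each maximal run, emit f'{j-i}{s[i]}') collected into a list and joined once; Pre_ excludes only the empty string, on which A raises IndexError at s[0].
import Mathlib
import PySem

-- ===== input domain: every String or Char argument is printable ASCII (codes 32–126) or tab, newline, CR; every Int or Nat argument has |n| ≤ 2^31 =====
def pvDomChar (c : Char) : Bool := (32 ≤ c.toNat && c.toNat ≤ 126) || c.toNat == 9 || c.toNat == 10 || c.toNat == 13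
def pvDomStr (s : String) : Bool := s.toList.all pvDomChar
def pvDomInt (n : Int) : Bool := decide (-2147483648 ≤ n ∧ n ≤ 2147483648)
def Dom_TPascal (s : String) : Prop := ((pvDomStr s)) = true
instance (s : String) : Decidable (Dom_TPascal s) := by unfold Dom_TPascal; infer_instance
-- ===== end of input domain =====

-- B replaces A's counter/curr/prev-char index loop and string += by a nested run-scan joined once;
-- on the empty string (excluded by Pre_) A raises IndexError at s[0].

-- ===== PORT A =====
-- the for-loop over range(len(s)) with state (new_s, c, curr); s[i] / s[i-1] read with getD (i is always in range)
def TPascalGoA (cs : List Char) (i : Nat) (st : List Char × Int × Char) : List Char × Int × Char :=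
  if i < cs.length then
    let x := cs.getD i ' '
    let st' := if i > 0 ∧ x ≠ st.2.2
      then (st.1 ++ PySem.Int.toChars st.2.1 ++ [cs.getD (i-1) ' '], (0 : Int), x)
      else st
    TPascalGoA cs (i+1) (st'.1, st'.2.1 + 1, st'.2.2)
  else st
termination_by cs.length - i

def TPascal (s : String) : String :=
  match s.toList with
  | [] => ""   -- unreachable under Pre_TPascal: Python raises IndexError at s[0]
  | c0 :: _ =>
    let st := TPascalGoA s.toList 0 ([], 0, c0)
    String.ofList (st.1 ++ PySem.Int.toChars st.2.1 ++ [st.2.2])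

-- ===== PORT B =====
-- inner while: length of the maximal leading run of c, and the rest
def runLen (c : Char) : List Char → Nat × List Char
  | [] => (0, [])
  | d :: rest => if d = c then let p := runLen c rest; (p.1 + 1, p.2) else (0, d :: rest)

theorem runLen_snd_le (c : Char) (l : List Char) : (runLen c l).2.length ≤ l.length := by
  induction l with
  | nil => simp [runLen]
  | cons d rest ih =>
    simp only [runLen]
    split
    · simpa using Nat.le_succ_of_le ih
    · simp

-- outer while: list of (run char, run length)
def runGroups : List Char → List (Char × Nat)
  | [] => []
  | x :: rest =>
    let p := runLen x rest
    (x, p.1 + 1) :: runGroups p.2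
termination_by l => l.length
decreasing_by simpa using Nat.lt_succ_of_le (runLen_snd_le x rest)

def TPascal_alt (s : String) : String :=
  String.ofList (((runGroups s.toList).map
    (fun g => PySem.Int.toChars (g.2 : Int) ++ [g.1])).flatten)

-- ===== PRECONDITION & SPEC =====
-- Pre_ excludes only the empty string, on which A raises IndexError at s[0]
def Pre_TPascal (s : String) : Prop := s ≠ ""
instance (s : String) : Decidable (Pre_TPascal s) := by unfold Pre_TPascal; infer_instance
def pvWitness_TPascal : String := "1211"

def Spec_TPascal (s : String) (out : String) : Prop := out = TPascal_alt s
instance (s : String) (out : String) : Decidable (Spec_TPascal s out) := by unfold Spec_TPascal; infer_instance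

-- ===== CLAIM (what is proved, stated in full; the proofs are below) =====
def Claim_equal_TPascal : Prop := ∀ (s : String), Dom_TPascal s → Pre_TPascal s → Spec_TPascal s (TPascal s)

-- ===== LEMMAS AND PROOFS =====

-- the middle abstraction: A's loop as a state machine over the remaining characters
def loopC : List Char → Int → Char → List Char → List Char
  | [], c, curr, acc => acc ++ PySem.Int.toChars c ++ [curr]
  | x :: r, c, curr, acc =>
    if x ≠ curr then loopC r 1 x (acc ++ PySem.Int.toChars c ++ [curr])
    else loopC r (c + 1) curr acc

def renderB (gs : List (Char × Nat)) : List Char :=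
  (gs.map (fun g => PySem.Int.toChars (g.2 : Int) ++ [g.1])).flatten

def finishA (st : List Char × Int × Char) : List Char :=
  st.1 ++ PySem.Int.toChars st.2.1 ++ [st.2.2]

-- A's index loop equals loopC once curr is the previous character
theorem goA_eq_loopC (cs : List Char) (i : Nat) (acc : List Char) (c : Int) (curr : Char)
    (h1 : 1 ≤ i) (h2 : curr = cs.getD (i-1) ' ') :
    finishA (TPascalGoA cs i (acc, c, curr)) = loopC (cs.drop i) c curr acc := by
  by_cases hlt : i < cs.length
  · rw [TPascalGoA]
    have hdrop : cs.drop i = cs[i] :: cs.drop (i+1) := List.drop_eq_getElem_cons hlt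
    have hx : cs.getD i ' ' = cs[i] := List.getD_eq_getElem cs ' ' hlt
    have hpos : 0 < i := h1
    have hprev : cs.getD (i+1-1) ' ' = cs[i] := by
      rw [Nat.add_sub_cancel]; exact hx
    by_cases hne : cs[i] ≠ curr
    · simp only [hlt, if_true, hx, hpos, hne, and_self, if_pos, gt_iff_lt, true_and,
        not_false_eq_true, ne_eq]
      rw [goA_eq_loopC cs (i+1) _ (0+1) cs[i] (by omega) hprev.symm]
      rw [hdrop, loopC, if_pos hne, h2, List.getD_eq_getElem?_getD, zero_add]
    · push_neg at hne
      simp only [hlt, if_true, hx, hne, ne_eq, not_true_eq_false, and_false, if_false]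
      rw [goA_eq_loopC cs (i+1) acc (c+1) curr (by omega) (by rw [hprev, hne])]
      rw [hdrop, loopC]
      simp [hne]
  · rw [TPascalGoA]
    simp only [hlt, if_false]
    rw [List.drop_eq_nil_of_le (by omega), loopC, finishA]
termination_by cs.length - i

-- loopC equals B's run grouping
theorem loopC_eq_render (rest : List Char) (curr : Char) (c : Int) (acc : List Char) :
    loopC rest c curr acc
    = acc ++ PySem.Int.toChars (c + ((runLen curr rest).1 : Int)) ++ [curr]
        ++ renderB (runGroups (runLen curr rest).2) := by
  induction rest generalizing curr c acc with
  | nil => simp [loopC, runLen, runGroups, renderB]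
  | cons x r ih =>
    by_cases hx : x = curr
    · subst hx
      rw [loopC]
      simp only [ne_eq, not_true_eq_false, if_false, runLen, if_pos rfl]
      rw [ih, show c + 1 + ((runLen x r).1 : Int)
            = c + (((runLen x r).1 + 1 : Nat) : Int) by push_cast; ring]
      simp
    · rw [loopC]
      simp only [ne_eq, hx, not_false_eq_true, if_pos]
      rw [ih]
      have hr : runLen curr (x :: r) = (0, x :: r) := by simp [runLen, hx]
      rw [hr]
      simp only [runGroups, renderB, List.map_cons, List.flatten_cons]
      rw [show (1 : Int) + ((runLen x r).1 : Int)
            = (((runLen x r).1 + 1 : Nat) : Int) by push_cast; ring]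
      simp

theorem listA_eq_listB (c0 : Char) (rs : List Char) :
    finishA (TPascalGoA (c0 :: rs) 0 ([], 0, c0))
    = renderB (runGroups (c0 :: rs)) := by
  rw [TPascalGoA]
  have hlen : 0 < (c0 :: rs).length := by simp
  simp only [hlen, if_true, gt_iff_lt, lt_irrefl, false_and, if_false]
  rw [goA_eq_loopC (c0 :: rs) (0+1) [] (0+1) c0 le_rfl (by simp)]
  simp only [List.drop_succ_cons, List.drop_zero]
  rw [loopC_eq_render]
  simp only [runGroups, renderB, List.map_cons, List.flatten_cons]
  rw [show (0 : Int) + 1 + ((runLen c0 rs).1 : Int)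
        = (((runLen c0 rs).1 + 1 : Nat) : Int) by push_cast; ring]
  simp

theorem TPascal_eq_alt (s : String) (hs : s ≠ "") : TPascal s = TPascal_alt s := by
  unfold TPascal TPascal_alt
  cases hcs : s.toList with
  | nil => exact absurd (by rw [← s.ofList_toList, hcs]) hs
  | cons c0 rs =>
    simp only [hcs]
    exact congrArg String.ofList (listA_eq_listB c0 rs)

-- ===== VERDICT (by name: the statement is the Claim_ definition above) =====
theorem TPascal_spec : Claim_equal_TPascal := by
  intro s _ hpre
  exact TPascal_eq_alt s hpre
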